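-- pv_equiv track=rewrite | github.com/aaletov/ml-course | contest/contest1/fireworks_1.py | sort_preserving_index
-- ===== SOURCE A (Python) =====
-- import typing
--
-- def sort_preserving_index(
--     arr: typing.List[int],
--     preserve_idx: int,
-- ) -> typing.Tuple[typing.List[int], int]:
--     indexed_arr = list(enumerate(arr))
--     indexed_arr.sort(key=lambda pair: pair[1])
--     new_idx = -1
--     for i in range(len(indexed_arr)):
--         if indexed_arr[i][0] == preserve_idx:
--             new_idx = i
--             break
--
--     return (list([pair[1] for pair in indexed_arr]), new_idx)
-- ===== SOURCE B (Python) =====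
-- import typing
--
-- def sort_preserving_index(
--     arr: typing.List[int],
--     preserve_idx: int,
-- ) -> typing.Tuple[typing.List[int], int]:
--     res = sorted(arr)
--     if 0 <= preserve_idx < len(arr):
--         val = arr[preserve_idx]
--         # rank counting: elements strictly smaller, plus equal elements
--         # that originally stood before preserve_idx (sort stability)
--         new_idx = sum(1 for x in arr if x < val) + arr[:preserve_idx].count(val)
--     else:
--         new_idx = -1
--     return (res, new_idx)
-- ===== Notes on version B (the rewrite author's own statement) =====
-- stated objective: faster
-- what changed: Replaces the decorate-sort-undecorate (sorting (index,value) pairs, then scanning the sorted pairs for the preserved index) by a plain sort of the values plus a rank-counting pass: new_idx = (# elements < val) + (# equal elements originally before preserve_idx), which matches stable-sort placement.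
import Mathlib
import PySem

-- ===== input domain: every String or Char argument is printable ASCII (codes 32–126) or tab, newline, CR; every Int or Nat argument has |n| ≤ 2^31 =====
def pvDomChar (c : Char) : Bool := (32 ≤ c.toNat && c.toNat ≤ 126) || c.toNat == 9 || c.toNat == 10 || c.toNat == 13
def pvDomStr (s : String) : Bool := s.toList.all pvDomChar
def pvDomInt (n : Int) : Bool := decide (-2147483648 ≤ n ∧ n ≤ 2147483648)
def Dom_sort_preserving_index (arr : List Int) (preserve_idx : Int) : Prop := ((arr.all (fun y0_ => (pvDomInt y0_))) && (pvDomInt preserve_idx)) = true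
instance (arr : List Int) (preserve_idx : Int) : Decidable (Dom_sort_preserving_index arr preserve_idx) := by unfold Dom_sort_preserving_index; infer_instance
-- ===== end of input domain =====

-- B replaces A's scan of the decorated sorted list by a rank-counting pass over the
-- original list (alternative decomposition, same asymptotic cost).

-- ===== PORT A =====
-- A's 'for i in range(len(indexed_arr)): if indexed_arr[i][0] == preserve_idx: new_idx = i; break'
-- transliterated as a structural recursion carrying the running index i (new_idx stays -1 if no hit).
def pvFindLoopA (preserve_idx : Int) : List (Int × Int) → Int → Int
  | [], _ => -1
  | p :: rest, i => if p.1 == preserve_idx then i else pvFindLoopA preserve_idx rest (i + 1)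

def sort_preserving_index (arr : List Int) (preserve_idx : Int) : List Int × Int :=
  let indexed_arr := PySem.List.sorted (PySem.List.enumerate arr 0) (fun pair => pair.2) false
  let new_idx := pvFindLoopA preserve_idx indexed_arr 0
  (indexed_arr.map (fun pair => pair.2), new_idx)

-- ===== PORT B =====
def sort_preserving_index_alt (arr : List Int) (preserve_idx : Int) : List Int × Int :=
  let res := PySem.List.sorted arr (fun x => x) false
  let new_idx : Int :=
    if 0 ≤ preserve_idx ∧ preserve_idx < (arr.length : Int) then
      let val := PySem.List.pyGetD arr preserve_idx 0
      (arr.countP (fun x => decide (x < val)) : Int)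
        + ((PySem.List.slice arr none (some preserve_idx)).count val : Int)
    else -1
  (res, new_idx)

-- ===== PRECONDITION & SPEC =====
def Spec_sort_preserving_index (arr : List Int) (preserve_idx : Int) (out : List Int × Int) : Prop := out = sort_preserving_index_alt arr preserve_idx
instance (arr : List Int) (preserve_idx : Int) (out : List Int × Int) : Decidable (Spec_sort_preserving_index arr preserve_idx out) := by unfold Spec_sort_preserving_index; infer_instance

-- ===== CLAIM (what is proved, stated in full; the proofs are below) =====
def Claim_equal_sort_preserving_index : Prop := ∀ (arr : List Int) (preserve_idx : Int), Dom_sort_preserving_index arr preserve_idx → Spec_sort_preserving_index arr preserve_idx (sort_preserving_index arr preserve_idx)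

-- ===== LEMMAS AND PROOFS =====

-- the stable-sort order on decorated pairs: by value, ties by original index
def pvLex (p q : Int × Int) : Prop := p.2 < q.2 ∨ (p.2 = q.2 ∧ p.1 < q.1)

theorem pvInsertBy_pairwise_lex (x : Int × Int) (acc : List (Int × Int))
    (hp : acc.Pairwise pvLex) (hfst : ∀ p ∈ acc, p.1 < x.1) :
    (PySem.List.insertBy (fun a b => decide (a.2 < b.2)) x acc).Pairwise pvLex := by
  induction acc with
  | nil => simp [PySem.List.insertBy, pvLex]
  | cons y ys ih =>
    simp only [PySem.List.insertBy]
    by_cases h : x.2 < y.2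
    · simp only [h, decide_true, if_true]
      obtain ⟨hy, hys⟩ := List.pairwise_cons.mp hp
      constructor
      · intro z hz
        rcases List.mem_cons.mp hz with rfl | hz
        · exact Or.inl h
        · rcases hy z hz with h1 | ⟨h1, h2⟩
          · exact Or.inl (lt_trans h h1)
          · exact Or.inl (h1 ▸ h)
      · exact List.Pairwise.cons hy hys
    · simp only [h, decide_false]
      obtain ⟨hy, hys⟩ := List.pairwise_cons.mp hp
      constructor
      · intro z hz
        rw [PySem.List.mem_insertBy] at hz
        rcases hz with rfl | hz
        · rcases lt_or_eq_of_le (not_lt.mp h) with h1 | h1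
          · exact Or.inl h1
          · exact Or.inr ⟨h1, hfst y (List.mem_cons_self) ⟩
        · exact hy z hz
      · exact ih hys (fun p hp' => hfst p (List.mem_cons_of_mem _ hp'))

theorem pvFoldl_pairwise_lex (L : List (Int × Int)) (acc : List (Int × Int))
    (hp : acc.Pairwise pvLex)
    (hcross : ∀ p ∈ acc, ∀ q ∈ L, p.1 < q.1)
    (hL : L.Pairwise (fun p q => p.1 < q.1)) :
    (L.foldl (fun acc x => PySem.List.insertBy (fun a b => decide (a.2 < b.2)) x acc) acc).Pairwise pvLex := by
  induction L generalizing acc with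
  | nil => simpa using hp
  | cons x xs ih =>
    rcases hL with _ | ⟨hx, hxs⟩
    simp only [List.foldl_cons]
    apply ih
    · exact pvInsertBy_pairwise_lex x acc hp (fun p hp' => hcross p hp' x (List.mem_cons_self))
    · intro p hpmem q hq
      rw [PySem.List.mem_insertBy] at hpmem
      rcases hpmem with rfl | hpmem
      · exact hx q hq
      · exact hcross p hpmem q (List.mem_cons_of_mem _ hq)
    · exact hxs

theorem pvSorted_pairwise_lex (arr : List Int) :
    (PySem.List.sorted (PySem.List.enumerate arr 0) (fun pair => pair.2) false).Pairwise pvLex := by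
  rw [PySem.List.sorted_eq_foldl_insertBy]
  exact pvFoldl_pairwise_lex _ [] (List.Pairwise.nil) (by simp) (PySem.List.pairwise_lt_enumerate arr 0)

theorem pvFindLoopA_split (P : Int) (l1 l2 : List (Int × Int)) (e0 : Int × Int)
    (h1 : ∀ p ∈ l1, p.1 ≠ P) (h0 : e0.1 = P) (i : Int) :
    pvFindLoopA P (l1 ++ e0 :: l2) i = i + l1.length := by
  induction l1 generalizing i with
  | nil => simp [pvFindLoopA, h0]
  | cons y ys ih =>
    have hy : y.1 ≠ P := h1 y (List.mem_cons_self)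
    simp only [List.cons_append, pvFindLoopA, beq_iff_eq, hy, if_false]
    rw [ih (fun p hp => h1 p (List.mem_cons_of_mem _ hp)) (i + 1)]
    simp only [List.length_cons]
    push_cast
    ring

theorem pvFindLoopA_none (P : Int) (S : List (Int × Int)) (h : ∀ p ∈ S, p.1 ≠ P) (i : Int) :
    pvFindLoopA P S i = -1 := by
  induction S generalizing i with
  | nil => rfl
  | cons y ys ih =>
    simp only [pvFindLoopA, beq_iff_eq, h y (List.mem_cons_self), if_false]
    exact ih (fun p hp => h p (List.mem_cons_of_mem _ hp)) (i + 1)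

-- counting the lex-smaller elements over the enumerate list, as B counts them
theorem pvCount_enumerate (val P : Int) (arr : List Int) (s : Int) :
    (PySem.List.enumerate arr s).countP
        (fun p => decide (p.2 < val) || (p.2 == val && decide (p.1 < P)))
      = arr.countP (fun x => decide (x < val)) + (arr.take (P - s).toNat).count val := by
  induction arr generalizing s with
  | nil => simp [PySem.List.enumerate_nil]
  | cons x xs ih =>
    rw [PySem.List.enumerate_cons]
    rw [List.countP_cons, List.countP_cons]
    rw [ih (s + 1)]
    by_cases hsP : s < P
    · have htake : (P - s).toNat = (P - (s+1)).toNat + 1 := by omega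
      rw [htake, List.take_succ_cons, List.count_cons]
      simp only [hsP, decide_true, Bool.and_true]
      by_cases hlt : x < val
      · have hne : ¬ (x = val) := by omega
        simp [hlt, hne]
        omega
      · by_cases heq : x = val
        · simp [heq]
          omega
        · simp [hlt, heq]
    · have htake0 : (P - s).toNat = 0 := by omega
      have htake1 : (P - (s+1)).toNat = 0 := by omega
      rw [htake0, htake1]
      simp only [List.take_zero, List.count_nil, hsP, decide_false, Bool.and_false, Bool.or_false]
      omega

theorem pvCountP_split (val P : Int) (l1 l2 : List (Int × Int))
    (h1 : ∀ p ∈ l1, pvLex p (P, val))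
    (h2 : ∀ p ∈ l2, pvLex (P, val) p) :
    (l1 ++ (P, val) :: l2).countP
        (fun p => decide (p.2 < val) || (p.2 == val && decide (p.1 < P)))
      = l1.length := by
  rw [List.countP_append, List.countP_cons]
  have hl1 : l1.countP (fun p => decide (p.2 < val) || (p.2 == val && decide (p.1 < P))) = l1.length := by
    rw [List.countP_eq_length]
    intro p hp
    simp only [Bool.or_eq_true, decide_eq_true_eq, Bool.and_eq_true, beq_iff_eq]
    rcases h1 p hp with h | ⟨hq, hr⟩
    · exact Or.inl h
    · exact Or.inr ⟨hq, hr⟩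
  have hl2 : l2.countP (fun p => decide (p.2 < val) || (p.2 == val && decide (p.1 < P))) = 0 := by
    rw [List.countP_eq_zero]
    intro p hp
    simp only [Bool.or_eq_true, Bool.and_eq_true, decide_eq_true_eq, beq_iff_eq, not_or, not_and]
    rcases h2 p hp with h | ⟨hq, hr⟩
    · exact ⟨by omega, fun hc => by omega⟩
    · exact ⟨by omega, fun hc => by omega⟩
  simp [hl1, hl2]

theorem sort_preserving_index_spec : Claim_equal_sort_preserving_index := by
  intro arr P _
  unfold Spec_sort_preserving_index sort_preserving_index sort_preserving_index_alt
  set E := PySem.List.enumerate arr 0 with hE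
  set S := PySem.List.sorted E (fun pair => pair.2) false with hS
  have hperm : S.Perm E := PySem.List.sorted_perm E _ false
  -- the values list
  have hvals : S.map (fun pair => pair.2) = PySem.List.sorted arr (fun x => x) false := by
    symm
    apply PySem.List.sorted_id_eq_of_perm_of_pairwise
    · have : (S.map (fun pair => pair.2)).Perm (E.map (fun pair => pair.2)) := hperm.map _
      rwa [hE, PySem.List.map_snd_enumerate] at this
    · have := PySem.List.sorted_pairwise E (fun pair => pair.2)
      rw [← hS] at this
      exact List.pairwise_map.mpr this
  have hlex : S.Pairwise pvLex := pvSorted_pairwise_lex arr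
  have hfstne : S.Pairwise (fun p q => p.1 ≠ q.1) := by
    have hEp : E.Pairwise (fun p q => p.1 ≠ q.1) :=
      (PySem.List.pairwise_lt_enumerate arr 0).imp (fun h => ne_of_lt h)
    exact (List.Perm.pairwise_iff (fun h => Ne.symm h) hperm).mpr hEp
  by_cases hin : 0 ≤ P ∧ P < (arr.length : Int)
  · -- in range: locate the decorated element
    rw [if_pos hin]
    set val := PySem.List.pyGetD arr P 0 with hval
    have hk : P.toNat < arr.length := by omega
    have hcast : ((P.toNat : Nat) : Int) = P := by omega
    have hvalget : val = arr[P.toNat] := by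
      rw [hval]
      conv_lhs => rw [← hcast]
      rw [PySem.List.pyGetD_natCast]
      exact List.getD_eq_getElem arr 0 hk
    have hmem : (P, val) ∈ S := by
      rw [hperm.mem_iff, hE, PySem.List.mem_enumerate_iff]
      exact ⟨P.toNat, hk, by simp [hvalget]; omega⟩
    obtain ⟨l1, l2, hsplit⟩ := List.append_of_mem hmem
    rw [hsplit] at hlex hfstne
    rw [List.pairwise_append] at hlex hfstne
    obtain ⟨hlex1, hlex2, hlexc⟩ := hlex
    obtain ⟨hne1, hne2, hnec⟩ := hfstne
    have h1ne : ∀ p ∈ l1, p.1 ≠ P := fun p hp => hnec p hp (P, val) (List.mem_cons_self)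
    have h2lex : ∀ p ∈ l2, pvLex (P, val) p :=
      fun p hp => (List.pairwise_cons.mp hlex2).1 p hp
    have h1lex : ∀ p ∈ l1, pvLex p (P, val) := fun p hp => hlexc p hp (P, val) (List.mem_cons_self)
    -- A's loop finds position l1.length
    have hA : pvFindLoopA P S 0 = (l1.length : Int) := by
      rw [hsplit, pvFindLoopA_split P l1 l2 (P, val) h1ne rfl 0]
      ring
    -- B's count equals l1.length
    have hcountS : S.countP (fun p => decide (p.2 < val) || (p.2 == val && decide (p.1 < P)))
        = l1.length := by
      rw [hsplit]
      exact pvCountP_split val P l1 l2 h1lex h2lex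
    have hcountE := hperm.countP_eq (fun p => decide (p.2 < val) || (p.2 == val && decide (p.1 < P)))
    rw [hcountS] at hcountE
    have hslice : PySem.List.slice arr none (some P) = arr.take P.toNat :=
      PySem.List.slice_to arr hin.1
    have hcount := pvCount_enumerate val P arr 0
    rw [← hE] at hcount
    rw [← hcountE] at hcount
    refine Prod.ext ?_ ?_
    · simpa using hvals
    · simp only
      rw [show (P - 0).toNat = P.toNat by omega] at hcount
      rw [hA, hslice, hcount]
      push_cast
      ring
  · -- out of range: -1 on both sides
    rw [if_neg hin]
    have hnone : ∀ p ∈ S, p.1 ≠ P := by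
      intro p hp
      rw [hperm.mem_iff, hE, PySem.List.mem_enumerate_iff] at hp
      obtain ⟨k, hk, rfl⟩ := hp
      simp only [zero_add]
      omega
    refine Prod.ext ?_ ?_
    · simpa using hvals
    · simpa using pvFindLoopA_none P S hnone 0
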